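-- pv_equiv track=rewrite | github.com/ywatanabe1989/scitex-python | src/scitex/scholar/core/_Paper.py | _escape_bibtex
-- ===== SOURCE A (Python) =====
-- def _escape_bibtex(text: str) -> str:
--     """Escape special characters for BibTeX."""
--     if not text:
--         return ""
--     # Handle special characters
--     replacements = {
--         "\\": r"\\",
--         "{": r"\{",
--         "}": r"\}",
--         "_": r"\_",
--         "&": r"\&",
--         "%": r"\%",
--         "$": r"\$",
--         "#": r"\#",
--         "~": r"\textasciitilde{}",
--         "^": r"\textasciicircum{}",
--     }
--     for old, new in replacements.items():
--         text = text.replace(old, new)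
--     return text
-- ===== SOURCE B (Python) =====
-- def _escape_bibtex(text: str) -> str:
--     """Escape special characters for BibTeX: one pass, explicit branch per character."""
--     if not text:
--         return ""
--     parts = []
--     for ch in text:
--         if ch == "\\":
--             parts.append("\\\\")
--         elif ch == "{":
--             parts.append("\\{")
--         elif ch == "}":
--             parts.append("\\}")
--         elif ch == "_":
--             parts.append("\\_")
--         elif ch == "&":
--             parts.append("\\&")
--         elif ch == "%":
--             parts.append("\\%")
--         elif ch == "$":
--             parts.append("\\$")
--         elif ch == "#":
--             parts.append("\\#")
--         elif ch == "~":
--             parts.append("\\textasciitilde{}")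
--         elif ch == "^":
--             parts.append("\\textasciicircum{}")
--         else:
--             parts.append(ch)
--     return "".join(parts)
-- ===== Notes on version B (the rewrite author's own statement) =====
-- stated objective: alternative
-- what changed: Replaces ten sequential full-string text.replace passes (driven by a dict) with a single left-to-right pass over the characters, an explicit if/elif branch per special character appending the escape to an accumulator list joined at the end; exact because no inserted escape text is ever re-processed.
import Mathlib
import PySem

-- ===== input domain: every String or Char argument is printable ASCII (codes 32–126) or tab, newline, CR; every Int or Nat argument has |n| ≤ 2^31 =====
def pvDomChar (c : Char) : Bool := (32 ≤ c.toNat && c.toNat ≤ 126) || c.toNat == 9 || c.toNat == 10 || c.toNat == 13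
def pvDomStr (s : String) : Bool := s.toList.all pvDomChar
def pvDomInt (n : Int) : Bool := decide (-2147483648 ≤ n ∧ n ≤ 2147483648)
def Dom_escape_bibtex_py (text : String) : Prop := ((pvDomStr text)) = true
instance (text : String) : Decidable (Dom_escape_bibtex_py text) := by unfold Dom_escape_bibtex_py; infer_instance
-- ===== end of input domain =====

set_option maxRecDepth 4000


-- B replaces A's ten sequential full-string replace passes (dict-driven) by one
-- left-to-right pass with an explicit branch per special character (objective: alternative).

-- ===== PORT A =====
-- A's `replacements` dict, iterated by `.items()` in insertion order.
def escapeBibtexPairs : List (String × String) :=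
  [("\\", "\\\\"), ("{", "\\{"), ("}", "\\}"), ("_", "\\_"), ("&", "\\&"),
   ("%", "\\%"), ("$", "\\$"), ("#", "\\#"),
   ("~", "\\textasciitilde{}"), ("^", "\\textasciicircum{}")]

def escape_bibtex_py (text : String) : String :=
  if text = "" then ""
  else escapeBibtexPairs.foldl (fun t p => PySem.Str.replace t p.1 p.2) text

-- ===== PORT B =====
-- The if/elif chain of Source B: the piece appended to `parts` for one character.
def escapeBibtexPiece (ch : Char) : List Char :=
  if ch = '\\' then "\\\\".toList
  else if ch = '{' then "\\{".toList
  else if ch = '}' then "\\}".toList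
  else if ch = '_' then "\\_".toList
  else if ch = '&' then "\\&".toList
  else if ch = '%' then "\\%".toList
  else if ch = '$' then "\\$".toList
  else if ch = '#' then "\\#".toList
  else if ch = '~' then "\\textasciitilde{}".toList
  else if ch = '^' then "\\textasciicircum{}".toList
  else [ch]

def escape_bibtex_py_alt (text : String) : String :=
  if text = "" then ""
  else String.ofList
    (text.toList.foldl (fun parts ch => parts ++ escapeBibtexPiece ch) [])

-- ===== PRECONDITION & SPEC =====
def Spec_escape_bibtex_py (text : String) (out : String) : Prop := out = escape_bibtex_py_alt text
instance (text : String) (out : String) : Decidable (Spec_escape_bibtex_py text out) := by unfold Spec_escape_bibtex_py; infer_instance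

-- ===== CLAIM (what is proved, stated in full; the proofs are below) =====
def Claim_equal_escape_bibtex_py : Prop := ∀ (text : String), Dom_escape_bibtex_py text → Spec_escape_bibtex_py text (escape_bibtex_py text)

-- ===== LEMMAS AND PROOFS =====

-- `replace` with a single-character pattern is a per-character flatMap.
theorem replace_go_single (c : Char) (r : List Char) :
    ∀ (fuel : Nat) (l acc : List Char), l.length ≤ fuel →
      PySem.Chars.replace.go [c] r fuel l acc =
        acc.reverse ++ l.flatMap (fun x => if x = c then r else [x]) := by
  intro fuel
  induction fuel with
  | zero =>
    intro l acc h
    have : l = [] := List.eq_nil_of_length_eq_zero (Nat.le_zero.mp h)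
    subst this; simp [PySem.Chars.replace.go]
  | succ n ih =>
    intro l acc h
    cases l with
    | nil => simp [PySem.Chars.replace.go]
    | cons c' t =>
      have ht : t.length ≤ n := by simpa using Nat.lt_succ_iff.mp (Nat.lt_of_lt_of_le (by simp) h)
      by_cases hc : c' = c
      · subst hc
        have hp : List.isPrefixOf [c'] (c' :: t) = true := by simp [List.isPrefixOf]
        simp [PySem.Chars.replace.go, hp, ih _ _ ht]
      · have hp : List.isPrefixOf [c] (c' :: t) = false := by
          simp [List.isPrefixOf]; exact fun e => absurd e.symm hc
        simp [PySem.Chars.replace.go, hp, ih _ _ ht, hc]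

theorem replace_single (c : Char) (r s : List Char) :
    PySem.Chars.replace s [c] r = s.flatMap (fun x => if x = c then r else [x]) := by
  simp [PySem.Chars.replace, replace_go_single c r s.length s [] le_rfl]

-- B's accumulator loop is a flatMap of the per-character piece.
theorem foldl_piece (l : List Char) :
    ∀ acc : List Char,
      l.foldl (fun parts ch => parts ++ escapeBibtexPiece ch) acc =
        acc ++ l.flatMap escapeBibtexPiece := by
  induction l with
  | nil => simp
  | cons c t ih => intro acc; simp [List.foldl, ih, List.append_assoc]

-- ===== VERDICT (by name: the statement is the Claim_ definition above) =====
theorem escape_bibtex_py_spec : Claim_equal_escape_bibtex_py := by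
  intro text _
  unfold Spec_escape_bibtex_py escape_bibtex_py escape_bibtex_py_alt
  by_cases h : text = ""
  · simp [h]
  · rw [if_neg h, if_neg h, foldl_piece, List.nil_append]
    rw [← String.ofList_toList (s := escapeBibtexPairs.foldl
      (fun t p => PySem.Str.replace t p.1 p.2) text)]
    refine congrArg String.ofList ?_
    have hfold : escapeBibtexPairs.foldl (fun t p => PySem.Str.replace t p.1 p.2) text =
        PySem.Str.replace (PySem.Str.replace (PySem.Str.replace (PySem.Str.replace
          (PySem.Str.replace (PySem.Str.replace (PySem.Str.replace (PySem.Str.replace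
          (PySem.Str.replace (PySem.Str.replace text "\\" "\\\\") "{" "\\{") "}" "\\}")
          "_" "\\_") "&" "\\&") "%" "\\%") "$" "\\$") "#" "\\#")
          "~" "\\textasciitilde{}") "^" "\\textasciicircum{}" := rfl
    rw [hfold]
    simp only [PySem.Str.toList_replace]
    have e1 : ("\\" : String).toList = ['\\'] := rfl
    have e2 : ("{" : String).toList = ['{'] := rfl
    have e3 : ("}" : String).toList = ['}'] := rfl
    have e4 : ("_" : String).toList = ['_'] := rfl
    have e5 : ("&" : String).toList = ['&'] := rfl
    have e6 : ("%" : String).toList = ['%'] := rfl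
    have e7 : ("$" : String).toList = ['$'] := rfl
    have e8 : ("#" : String).toList = ['#'] := rfl
    have e9 : ("~" : String).toList = ['~'] := rfl
    have e10 : ("^" : String).toList = ['^'] := rfl
    rw [e1, e2, e3, e4, e5, e6, e7, e8, e9, e10]
    simp only [replace_single, List.flatMap_assoc]
    congr 1
    funext x
    by_cases h1 : x = '\\'; · subst h1; decide
    by_cases h2 : x = '{'; · subst h2; decide
    by_cases h3 : x = '}'; · subst h3; decide
    by_cases h4 : x = '_'; · subst h4; decide
    by_cases h5 : x = '&'; · subst h5; decide
    by_cases h6 : x = '%'; · subst h6; decide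
    by_cases h7 : x = '$'; · subst h7; decide
    by_cases h8 : x = '#'; · subst h8; decide
    by_cases h9 : x = '~'; · subst h9; decide
    by_cases h10 : x = '^'; · subst h10; decide
    simp [escapeBibtexPiece, h1, h2, h3, h4, h5, h6, h7, h8, h9, h10]
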